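-- pv_equiv track=rewrite | github.com/Pratham-DoshiSF/Training | pythonAssignment/Qusetion1.py | convert_to_numbers
-- ===== SOURCE A (Python) =====
-- word_to_digit = {
--     "zero": "0", "one": "1", "two": "2", "three": "3",
--     "four": "4", "five": "5", "six": "6", "seven": "7",
--     "eight": "8", "nine": "9"
-- }
--
-- def convert_to_numbers(i):
--     total_len = len(i)
--     num = ""
--     start = 0
--     end= 0
--
--     while (end<=total_len):
--         word = i[start:end]
--         if word in word_to_digit:
--             num += word_to_digit[word]
--
--             if end == total_len:
--                 return num
--             start = end
--             end = +1
--
--         end+=1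
-- ===== SOURCE B (Python) =====
-- word_to_digit = {
--     "zero": "0", "one": "1", "two": "2", "three": "3",
--     "four": "4", "five": "5", "six": "6", "seven": "7",
--     "eight": "8", "nine": "9"
-- }
--
-- def convert_to_numbers(i):
--     digits = []
--     pos = 0
--     n = len(i)
--     while pos < n:
--         for L in (3, 4, 5):
--             d = word_to_digit.get(i[pos:pos + L])
--             if d is not None:
--                 digits.append(d)
--                 pos += L
--                 break
--         else:
--             return None
--     return "".join(digits) if digits else None
-- ===== Notes on version B (the rewrite author's own statement) =====
-- stated objective: faster
-- what changed: A rescans from a reset index after every match (end is set back to 2) and grows the end index one character at a time; B makes a single left-to-right pass, probing only the three possible word lengths 3/4/5 with a dict lookup at each position.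
import Mathlib
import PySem

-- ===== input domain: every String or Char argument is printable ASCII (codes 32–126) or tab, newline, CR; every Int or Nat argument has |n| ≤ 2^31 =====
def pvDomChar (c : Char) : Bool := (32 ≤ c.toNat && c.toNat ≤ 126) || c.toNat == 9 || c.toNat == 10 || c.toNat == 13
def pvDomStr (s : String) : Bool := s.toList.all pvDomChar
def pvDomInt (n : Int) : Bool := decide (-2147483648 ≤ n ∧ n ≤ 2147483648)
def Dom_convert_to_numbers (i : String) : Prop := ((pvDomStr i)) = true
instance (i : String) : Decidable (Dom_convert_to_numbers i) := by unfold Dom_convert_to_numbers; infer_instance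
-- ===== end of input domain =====

-- B replaces A's quadratic rescan (the scan index is reset to 2 after every match) by a single
-- left-to-right pass that tests only the three possible word lengths 3/4/5 at each position.

-- ===== PORT A =====
def wordToDigit : PySem.Dict (List Char) (List Char) :=
  PySem.Dict.ofList
    [ (['z','e','r','o'], ['0']), (['o','n','e'], ['1']), (['t','w','o'], ['2']),
      (['t','h','r','e','e'], ['3']), (['f','o','u','r'], ['4']), (['f','i','v','e'], ['5']),
      (['s','i','x'], ['6']), (['s','e','v','e','n'], ['7']), (['e','i','g','h','t'], ['8']),
      (['n','i','n','e'], ['9']) ]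

-- A's while loop; state (num, start, end); `end = +1` followed by `end += 1` makes end 2 after a match.
def loopA (cs : List Char) (tl : Nat) (num : List Char) (start e : Nat) : Option String :=
  if _hle : e ≤ tl then
    match hw : wordToDigit.get? (PySem.List.slice cs (some (start:Int)) (some (e:Int))) with
    | some d =>
        if e = tl then some (String.ofList (num ++ d))
        else loopA cs tl (num ++ d) e 2
    | none => loopA cs tl num start (e + 1)
  else none
termination_by ((tl + 1) - start, (tl + 2) - e)
decreasing_by
  · have hne : PySem.List.slice cs (some (start:Int)) (some (e:Int)) ≠ [] := by
      intro h0
      rw [h0] at hw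
      have hnil : wordToDigit.get? ([]:List Char) = none := by decide
      rw [hnil] at hw
      simp at hw
    have hlt : start < e := by
      by_contra hge
      apply hne
      rw [PySem.List.slice_natCast]
      have : e - start = 0 := by omega
      simp [this]
    apply Prod.Lex.left
    omega
  · apply Prod.Lex.right
    omega

def convert_to_numbers (i : String) : Option String :=
  loopA i.toList i.toList.length [] 0 0

-- ===== PORT B =====
-- B's while loop: at each position try the slice of length 3, 4, 5 against the dict, advance on a hit.
def loopB (cs : List Char) (n pos : Nat) (digits : List (List Char)) : Option (List (List Char)) :=
  if _h : pos < n then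
    match wordToDigit.get? (PySem.List.slice cs (some (pos:Int)) (some ((pos + 3 : Nat):Int))) with
    | some d => loopB cs n (pos + 3) (digits ++ [d])
    | none =>
      match wordToDigit.get? (PySem.List.slice cs (some (pos:Int)) (some ((pos + 4 : Nat):Int))) with
      | some d => loopB cs n (pos + 4) (digits ++ [d])
      | none =>
        match wordToDigit.get? (PySem.List.slice cs (some (pos:Int)) (some ((pos + 5 : Nat):Int))) with
        | some d => loopB cs n (pos + 5) (digits ++ [d])
        | none => none
  else some digits
termination_by n - pos

def convert_to_numbers_alt (i : String) : Option String :=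
  match loopB i.toList i.toList.length 0 [] with
  | none => none
  | some ds => if ds ≠ [] then some (String.ofList (PySem.Chars.join [] ds)) else none

-- ===== PRECONDITION & SPEC =====
def Spec_convert_to_numbers (i : String) (out : Option String) : Prop := out = convert_to_numbers_alt i
instance (i : String) (out : Option String) : Decidable (Spec_convert_to_numbers i out) := by unfold Spec_convert_to_numbers; infer_instance

-- ===== CLAIM (what is proved, stated in full; the proofs are below) =====
def Claim_equal_convert_to_numbers : Prop := ∀ (i : String), Dom_convert_to_numbers i → Spec_convert_to_numbers i (convert_to_numbers i)

-- ===== LEMMAS AND PROOFS =====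

-- every key of the dict has length 3, 4 or 5
theorem wd_len {w d : List Char} (h : wordToDigit.get? w = some d) :
    w.length = 3 ∨ w.length = 4 ∨ w.length = 5 := by
  have hm := PySem.Dict.mem_items_of_get?_eq_some _ h
  have hi : wordToDigit.items =
      [ (['z','e','r','o'], ['0']), (['o','n','e'], ['1']), (['t','w','o'], ['2']),
        (['t','h','r','e','e'], ['3']), (['f','o','u','r'], ['4']), (['f','i','v','e'], ['5']),
        (['s','i','x'], ['6']), (['s','e','v','e','n'], ['7']), (['e','i','g','h','t'], ['8']),
        (['n','i','n','e'], ['9']) ] := by decide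
  rw [hi] at hm
  fin_cases hm <;> decide

theorem wd_none_of_len {w : List Char} (h3 : w.length ≠ 3) (h4 : w.length ≠ 4) (h5 : w.length ≠ 5) :
    wordToDigit.get? w = none := by
  cases h : wordToDigit.get? w with
  | none => rfl
  | some d => rcases wd_len h with h' | h' | h' <;> simp_all

-- join with empty separator is flatten
theorem join_nil_flatten (ds : List (List Char)) : PySem.Chars.join [] ds = ds.flatten := by
  simp only [PySem.Chars.join, List.intercalate]
  induction ds with
  | nil => simp
  | cons a t ih =>
    cases t with
    | nil => simp
    | cons b u => rw [List.intersperse_cons₂]; simp_all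

-- one-step unfoldings of A's loop
theorem loopA_unfold_none (cs : List Char) (tl : Nat) (num : List Char) (start e : Nat)
    (hle : e ≤ tl)
    (hn : wordToDigit.get? (PySem.List.slice cs (some (start:Int)) (some (e:Int))) = none) :
    loopA cs tl num start e = loopA cs tl num start (e + 1) := by
  rw [loopA, dif_pos hle]
  split
  · rename_i d hw; rw [hn] at hw; cases hw
  · rfl

theorem loopA_unfold_exit (cs : List Char) (tl : Nat) (num : List Char) (start e : Nat)
    (hgt : tl < e) : loopA cs tl num start e = none := by
  rw [loopA, dif_neg (by omega)]

theorem loopA_unfold_hit (cs : List Char) (tl : Nat) (num : List Char) (start e : Nat)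
    (d : List Char) (hle : e ≤ tl)
    (hsome : wordToDigit.get? (PySem.List.slice cs (some (start:Int)) (some (e:Int))) = some d) :
    loopA cs tl num start e
      = if e = tl then some (String.ofList (num ++ d)) else loopA cs tl (num ++ d) e 2 := by
  rw [loopA, dif_pos hle]
  split
  · rename_i d' hw
    rw [hsome] at hw
    obtain rfl : d = d' := by injection hw
    simp [String.ofList_append]
  · rename_i hw
    rw [hsome] at hw
    cases hw

-- scanning with e ≤ start+1 only skips empty slices
theorem loopA_lift (cs : List Char) : ∀ (k start e : Nat) (nm : List Char), e + k = start + 1 →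
    start < cs.length →
    loopA cs cs.length nm start e = loopA cs cs.length nm start (start + 1) := by
  intro k
  induction k with
  | zero =>
    intro start e nm he hs
    have : e = start + 1 := by omega
    rw [this]
  | succ k ih =>
    intro start e nm he hs
    have hsl : PySem.List.slice cs (some (start:Int)) (some (e:Int)) = [] := by
      rw [PySem.List.slice_natCast]
      have : e - start = 0 := by omega
      simp [this]
    have hn : wordToDigit.get? (PySem.List.slice cs (some (start:Int)) (some (e:Int))) = none := by
      rw [hsl]; decide
    rw [loopA_unfold_none cs cs.length nm start e (by omega) hn]
    exact ih start (e + 1) nm (by omega) hs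

-- past start+5 no slice can match: the loop runs off the end
theorem loopA_tail (cs : List Char) (nm : List Char) (start : Nat) :
    ∀ (j e : Nat), cs.length + 1 ≤ e + j → start + 5 < e →
    loopA cs cs.length nm start e = none := by
  intro j
  induction j with
  | zero =>
    intro e h1 h2
    exact loopA_unfold_exit cs cs.length nm start e (by omega)
  | succ j ih =>
    intro e h1 h2
    by_cases hle : e ≤ cs.length
    · have hlen : (PySem.List.slice cs (some (start:Int)) (some (e:Int))).length = e - start := by
        rw [PySem.List.slice_natCast]
        simp
        omega
      have hn := wd_none_of_len (w := PySem.List.slice cs (some (start:Int)) (some (e:Int)))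
        (by omega) (by omega) (by omega)
      rw [loopA_unfold_none cs cs.length nm start e hle hn]
      exact ih (e + 1) (by omega) (by omega)
    · exact loopA_unfold_exit cs cs.length nm start e (by omega)

-- loopB's accumulator is a pure prefix
theorem loopB_acc (cs : List Char) (n : Nat) : ∀ (k pos : Nat) (digits : List (List Char)),
    n - pos = k →
    loopB cs n pos digits = (loopB cs n pos []).map (digits ++ ·) := by
  intro k
  induction k using Nat.strong_induction_on with
  | _ k ih =>
    intro pos digits hk
    conv_lhs => rw [loopB]
    conv_rhs => rw [loopB]
    by_cases h : pos < n
    · rw [dif_pos h, dif_pos h]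
      cases h3 : wordToDigit.get? (PySem.List.slice cs (some (pos:Int)) (some ((pos + 3 : Nat):Int))) with
      | some d =>
        simp only []
        rw [ih (n - (pos + 3)) (by omega) (pos + 3) (digits ++ [d]) rfl,
            ih (n - (pos + 3)) (by omega) (pos + 3) ([] ++ [d]) rfl]
        cases loopB cs n (pos + 3) [] <;> simp
      | none =>
        cases h4 : wordToDigit.get? (PySem.List.slice cs (some (pos:Int)) (some ((pos + 4 : Nat):Int))) with
        | some d =>
          simp only []
          rw [ih (n - (pos + 4)) (by omega) (pos + 4) (digits ++ [d]) rfl,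
              ih (n - (pos + 4)) (by omega) (pos + 4) ([] ++ [d]) rfl]
          cases loopB cs n (pos + 4) [] <;> simp
        | none =>
          cases h5 : wordToDigit.get? (PySem.List.slice cs (some (pos:Int)) (some ((pos + 5 : Nat):Int))) with
          | some d =>
            simp only []
            rw [ih (n - (pos + 5)) (by omega) (pos + 5) (digits ++ [d]) rfl,
                ih (n - (pos + 5)) (by omega) (pos + 5) ([] ++ [d]) rfl]
            cases loopB cs n (pos + 5) [] <;> simp
          | none => simp
    · rw [dif_neg h, dif_neg h]
      simp

theorem loopB_le (cs : List Char) (n pos : Nat) (digits ds : List (List Char))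
    (h : loopB cs n pos digits = some ds) : digits.length ≤ ds.length := by
  rw [loopB_acc cs n (n - pos) pos digits rfl] at h
  cases hb : loopB cs n pos [] with
  | none => rw [hb] at h; simp at h
  | some t =>
    rw [hb] at h
    simp at h
    subst h
    simp

theorem loopB_grow (cs : List Char) (n pos : Nat) (digits ds : List (List Char))
    (hpos : pos < n) (h : loopB cs n pos digits = some ds) : digits.length < ds.length := by
  rw [loopB, dif_pos hpos] at h
  cases h3 : wordToDigit.get? (PySem.List.slice cs (some (pos:Int)) (some ((pos + 3 : Nat):Int))) with
  | some d =>
    rw [h3] at h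
    have := loopB_le cs n (pos + 3) (digits ++ [d]) ds h
    simp at this
    omega
  | none =>
    rw [h3] at h
    cases h4 : wordToDigit.get? (PySem.List.slice cs (some (pos:Int)) (some ((pos + 4 : Nat):Int))) with
    | some d =>
      rw [h4] at h
      have := loopB_le cs n (pos + 4) (digits ++ [d]) ds h
      simp at this
      omega
    | none =>
      rw [h4] at h
      cases h5 : wordToDigit.get? (PySem.List.slice cs (some (pos:Int)) (some ((pos + 5 : Nat):Int))) with
      | some d =>
        rw [h5] at h
        have := loopB_le cs n (pos + 5) (digits ++ [d]) ds h
        simp at this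
        omega
      | none => rw [h5] at h; simp at h

-- the main correspondence: A's scan from start+1 equals B's three-length probe at start
theorem mainM (cs : List Char) : ∀ (k start : Nat) (num : List Char), cs.length - start = k →
    start < cs.length →
    loopA cs cs.length num start (start + 1)
      = (loopB cs cs.length start []).map (fun ds => String.ofList (num ++ ds.flatten)) := by
  intro k
  induction k using Nat.strong_induction_on with
  | _ k ih =>
  intro start num hk hs
  -- length of the slice i[start:start+L]
  have hlen : ∀ L : Nat, (PySem.List.slice cs (some (start:Int)) (some ((start + L : Nat):Int))).length
      = min L (cs.length - start) := by
    intro L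
    rw [PySem.List.slice_natCast]
    simp
  -- clamped slices past the end coincide
  have hclamp : ∀ L L' : Nat, cs.length - start ≤ L → cs.length - start ≤ L' →
      PySem.List.slice cs (some (start:Int)) (some ((start + L : Nat):Int))
        = PySem.List.slice cs (some (start:Int)) (some ((start + L' : Nat):Int)) := by
    intro L L' h1 h2
    rw [PySem.List.slice_natCast, PySem.List.slice_natCast]
    simp only [Nat.add_sub_cancel_left]
    rw [List.take_of_length_le (by simp; omega), List.take_of_length_le (by simp; omega)]
  conv_rhs => rw [loopB]
  rw [dif_pos hs]
  -- step e = start+1 : slice of length 1, never a key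
  have hn1 : wordToDigit.get? (PySem.List.slice cs (some (start:Int)) (some ((start + 1 : Nat):Int))) = none :=
    wd_none_of_len (by rw [hlen 1]; omega) (by rw [hlen 1]; omega) (by rw [hlen 1]; omega)
  rw [loopA_unfold_none cs cs.length num start (start + 1) (by omega) hn1]
  by_cases h2 : start + 2 ≤ cs.length
  case neg =>
    -- cs.length - start = 1 : A exits, B finds only length-1 slices
    rw [loopA_unfold_exit cs cs.length num start (start + 1 + 1) (by omega)]
    have hn3 := wd_none_of_len (w := PySem.List.slice cs (some (start:Int)) (some ((start + 3 : Nat):Int)))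
      (by rw [hlen 3]; omega) (by rw [hlen 3]; omega) (by rw [hlen 3]; omega)
    have hn4 := wd_none_of_len (w := PySem.List.slice cs (some (start:Int)) (some ((start + 4 : Nat):Int)))
      (by rw [hlen 4]; omega) (by rw [hlen 4]; omega) (by rw [hlen 4]; omega)
    have hn5 := wd_none_of_len (w := PySem.List.slice cs (some (start:Int)) (some ((start + 5 : Nat):Int)))
      (by rw [hlen 5]; omega) (by rw [hlen 5]; omega) (by rw [hlen 5]; omega)
    rw [hn3, hn4, hn5]
    simp
  case pos =>
  -- step e = start+2 : slice of length 2, never a key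
  have hn2 : wordToDigit.get? (PySem.List.slice cs (some (start:Int)) (some ((start + 2 : Nat):Int))) = none :=
    wd_none_of_len (by rw [hlen 2]; omega) (by rw [hlen 2]; omega) (by rw [hlen 2]; omega)
  have e2 : start + 1 + 1 = start + 2 := by omega
  rw [e2, loopA_unfold_none cs cs.length num start (start + 2) h2 hn2]
  by_cases h3 : start + 3 ≤ cs.length
  case neg =>
    -- cs.length - start = 2
    rw [loopA_unfold_exit cs cs.length num start (start + 2 + 1) (by omega)]
    have hn3 := wd_none_of_len (w := PySem.List.slice cs (some (start:Int)) (some ((start + 3 : Nat):Int)))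
      (by rw [hlen 3]; omega) (by rw [hlen 3]; omega) (by rw [hlen 3]; omega)
    have hn4 := wd_none_of_len (w := PySem.List.slice cs (some (start:Int)) (some ((start + 4 : Nat):Int)))
      (by rw [hlen 4]; omega) (by rw [hlen 4]; omega) (by rw [hlen 4]; omega)
    have hn5 := wd_none_of_len (w := PySem.List.slice cs (some (start:Int)) (some ((start + 5 : Nat):Int)))
      (by rw [hlen 5]; omega) (by rw [hlen 5]; omega) (by rw [hlen 5]; omega)
    rw [hn3, hn4, hn5]
    simp
  case pos =>
  have e3 : start + 2 + 1 = start + 3 := by omega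
  rw [e3]
  cases hw3 : wordToDigit.get? (PySem.List.slice cs (some (start:Int)) (some ((start + 3 : Nat):Int))) with
  | some d =>
    rw [loopA_unfold_hit cs cs.length num start (start + 3) d h3 hw3]
    simp only []
    by_cases hq : start + 3 = cs.length
    case pos =>
      rw [if_pos hq]
      conv_rhs => rw [loopB]
      rw [dif_neg (by omega)]
      simp
    case neg =>
      rw [if_neg hq]
      rw [loopA_lift cs (start + 2) (start + 3) 2 (num ++ d) (by omega) (by omega)]
      rw [ih (cs.length - (start + 3)) (by omega) (start + 3) (num ++ d) rfl (by omega)]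
      rw [loopB_acc cs cs.length (cs.length - (start + 3)) (start + 3) ([] ++ [d]) rfl]
      cases loopB cs cs.length (start + 3) [] <;> simp
  | none =>
    by_cases h4 : start + 4 ≤ cs.length
    case neg =>
      -- cs.length - start = 3, slice of length 4/5 clamps to the length-3 slice
      rw [loopA_unfold_none cs cs.length num start (start + 3) h3 hw3]
      rw [loopA_unfold_exit cs cs.length num start (start + 3 + 1) (by omega)]
      rw [hclamp 4 3 (by omega) (by omega), hclamp 5 3 (by omega) (by omega)]
      rw [hw3]
      simp
    case pos =>
    have e4 : start + 3 + 1 = start + 4 := by omega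
    rw [loopA_unfold_none cs cs.length num start (start + 3) h3 hw3, e4]
    cases hw4 : wordToDigit.get? (PySem.List.slice cs (some (start:Int)) (some ((start + 4 : Nat):Int))) with
    | some d =>
      rw [loopA_unfold_hit cs cs.length num start (start + 4) d h4 hw4]
      simp only []
      by_cases hq : start + 4 = cs.length
      case pos =>
        rw [if_pos hq]
        conv_rhs => rw [loopB]
        rw [dif_neg (by omega)]
        simp
      case neg =>
        rw [if_neg hq]
        rw [loopA_lift cs (start + 3) (start + 4) 2 (num ++ d) (by omega) (by omega)]
        rw [ih (cs.length - (start + 4)) (by omega) (start + 4) (num ++ d) rfl (by omega)]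
        rw [loopB_acc cs cs.length (cs.length - (start + 4)) (start + 4) ([] ++ [d]) rfl]
        cases loopB cs cs.length (start + 4) [] <;> simp
    | none =>
      by_cases h5 : start + 5 ≤ cs.length
      case neg =>
        -- cs.length - start = 4, the length-5 slice clamps to the length-4 slice
        rw [loopA_unfold_none cs cs.length num start (start + 4) h4 hw4]
        rw [loopA_unfold_exit cs cs.length num start (start + 4 + 1) (by omega)]
        rw [hclamp 5 4 (by omega) (by omega)]
        rw [hw4]
        simp
      case pos =>
      have e5 : start + 4 + 1 = start + 5 := by omega
      rw [loopA_unfold_none cs cs.length num start (start + 4) h4 hw4, e5]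
      cases hw5 : wordToDigit.get? (PySem.List.slice cs (some (start:Int)) (some ((start + 5 : Nat):Int))) with
      | some d =>
        rw [loopA_unfold_hit cs cs.length num start (start + 5) d h5 hw5]
        simp only []
        by_cases hq : start + 5 = cs.length
        case pos =>
          rw [if_pos hq]
          conv_rhs => rw [loopB]
          rw [dif_neg (by omega)]
          simp
        case neg =>
          rw [if_neg hq]
          rw [loopA_lift cs (start + 4) (start + 5) 2 (num ++ d) (by omega) (by omega)]
          rw [ih (cs.length - (start + 5)) (by omega) (start + 5) (num ++ d) rfl (by omega)]
          rw [loopB_acc cs cs.length (cs.length - (start + 5)) (start + 5) ([] ++ [d]) rfl]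
          cases loopB cs cs.length (start + 5) [] <;> simp
      | none =>
        rw [loopA_unfold_none cs cs.length num start (start + 5) h5 hw5]
        exact loopA_tail cs num start (cs.length + 1) (start + 5 + 1) (by omega) (by omega)

-- ===== VERDICT (by name: the statement is the Claim_ definition above) =====
theorem convert_to_numbers_spec : Claim_equal_convert_to_numbers := by
  intro i _
  unfold Spec_convert_to_numbers convert_to_numbers convert_to_numbers_alt
  by_cases h0 : i.toList.length = 0
  · have hnil : i.toList = [] := List.eq_nil_of_length_eq_zero h0
    rw [hnil]
    rw [loopA_unfold_none [] ([] : List Char).length [] 0 0 (by simp) (by decide)]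
    rw [loopA_unfold_exit [] ([] : List Char).length [] 0 1 (by simp)]
    rw [loopB, dif_neg (by simp)]
    simp
  · have hs : 0 < i.toList.length := Nat.pos_of_ne_zero h0
    rw [loopA_lift i.toList 1 0 0 [] (by omega) hs]
    rw [mainM i.toList (i.toList.length - 0) 0 [] rfl hs]
    cases hB : loopB i.toList i.toList.length 0 [] with
    | none => simp
    | some ds =>
      have hne : ds ≠ [] := by
        intro hnil
        have := loopB_grow i.toList i.toList.length 0 [] ds hs hB
        simp [hnil] at this
      simp [hne, join_nil_flatten]
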